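-- pv_equiv track=rewrite | github.com/sandeepkumar8713/pythonapps | 25_fifthFolder/28_substrings_with_k_distinct_chars.py | subStringK
-- ===== SOURCE A (Python) =====
-- def subStringK(inpStr, k):
--     if not inpStr or k == 0:
--         return []
--
--     charMap = dict()
--     resultSet = set()
--     currSubStrStart = 0
--     for i in range(len(inpStr)):
--         if inpStr[i] in charMap and charMap[inpStr[i]] >= currSubStrStart:
--             currSubStrStart = charMap[inpStr[i]] + 1
--         charMap[inpStr[i]] = i
--         if i - currSubStrStart + 1 == k:
--             resultSet.add(inpStr[currSubStrStart:i + 1])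
--             currSubStrStart += 1
--     return list(resultSet)
-- ===== SOURCE B (Python) =====
-- def subStringK(inpStr, k):
--     if not inpStr or k <= 0:
--         return []
--     resultSet = set()
--     for i in range(len(inpStr) - k + 1):
--         sub = inpStr[i:i + k]
--         if len(set(sub)) == k:
--             resultSet.add(sub)
--     return list(resultSet)
-- ===== Notes on version B (the rewrite author's own statement) =====
-- stated objective: simpler
-- what changed: Replaces the sliding-window start pointer with a last-position dictionary by a direct enumeration of every length-k window, keeping a window exactly when its k characters are distinct.
import Mathlib
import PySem

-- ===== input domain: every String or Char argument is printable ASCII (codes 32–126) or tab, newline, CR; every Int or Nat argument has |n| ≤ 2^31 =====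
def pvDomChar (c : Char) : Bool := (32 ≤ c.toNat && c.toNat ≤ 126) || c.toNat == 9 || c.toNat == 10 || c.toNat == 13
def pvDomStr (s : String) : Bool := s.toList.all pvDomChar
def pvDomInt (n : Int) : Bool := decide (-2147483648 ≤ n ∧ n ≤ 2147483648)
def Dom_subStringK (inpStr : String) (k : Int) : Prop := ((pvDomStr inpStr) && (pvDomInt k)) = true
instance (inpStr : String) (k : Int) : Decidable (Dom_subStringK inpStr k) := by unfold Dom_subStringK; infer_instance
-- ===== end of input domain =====

-- B replaces A's sliding-window start pointer + last-position dictionary by a direct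
-- enumeration of every length-k window, kept when its k characters are distinct (objective: simpler).
-- A returns list(resultSet): the Python list order is hash order, so the result is compared as a set
-- (both ports return the PySem.Set list, distinct elements in first-insertion order).

-- ===== PORT A =====
-- loop body of A's for-loop, verbatim; state = (charMap, resultSet, currSubStrStart)
def stepA (cs : List Char) (k : Int)
    (st : PySem.Dict Char Int × PySem.Set String × Int) (i : Int) :
    PySem.Dict Char Int × PySem.Set String × Int :=
  let c := PySem.List.pyGetD cs i ' '
  let start := if st.1.contains c ∧ st.1.getD c 0 ≥ st.2.2 then st.1.getD c 0 + 1 else st.2.2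
  let charMap := st.1.insert c i
  if i - start + 1 = k then
    (charMap, PySem.Set.add st.2.1 (String.ofList (PySem.List.slice cs (some start) (some (i + 1)))), start + 1)
  else
    (charMap, st.2.1, start)

def subStringK (inpStr : String) (k : Int) : List String :=
  if inpStr = "" ∨ k = 0 then []
  else
    ((PySem.List.pyRange 0 (PySem.Str.len inpStr)).foldl (stepA inpStr.toList k)
      (PySem.Dict.empty, PySem.Set.empty, 0)).2.1

-- ===== PORT B =====
-- loop body of B's for-loop, verbatim
def stepB (cs : List Char) (k : Int) (resultSet : PySem.Set String) (i : Int) : PySem.Set String :=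
  let sub := PySem.List.slice cs (some i) (some (i + k))
  if PySem.Set.len (PySem.Set.ofList sub) = k then
    PySem.Set.add resultSet (String.ofList sub)
  else resultSet

def subStringK_alt (inpStr : String) (k : Int) : List String :=
  if inpStr = "" ∨ k ≤ 0 then []
  else
    (PySem.List.pyRange 0 (PySem.Str.len inpStr - k + 1)).foldl (stepB inpStr.toList k)
      PySem.Set.empty

-- ===== PRECONDITION & SPEC =====
def Spec_subStringK (inpStr : String) (k : Int) (out : List String) : Prop := out = subStringK_alt inpStr k
instance (inpStr : String) (k : Int) (out : List String) : Decidable (Spec_subStringK inpStr k out) := by unfold Spec_subStringK; infer_instance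

-- ===== CLAIM (what is proved, stated in full; the proofs are below) =====
def Claim_equal_subStringK : Prop := ∀ (inpStr : String) (k : Int), Dom_subStringK inpStr k → Spec_subStringK inpStr k (subStringK inpStr k)

-- ===== LEMMAS AND PROOFS =====

-- last index m < i with cs[m] = c (the content of A's charMap after i loop steps)
def lastBelow (cs : List Char) : Nat → Char → Option Nat
  | 0, _ => none
  | i+1, c => if cs[i]? = some c then some i else lastBelow cs i c

-- 1 + last occurrence below i (0 if none): the lower bound a duplicate of c forces on the window start
def occBound (cs : List Char) (i : Nat) (c : Char) : Nat :=
  match lastBelow cs i c with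
  | none => 0
  | some m => m + 1

-- minimal j such that cs[j..i-1] has no duplicate
def dStart (cs : List Char) : Nat → Nat
  | 0 => 0
  | i+1 => max (dStart cs i) (occBound cs i (cs.getD i ' '))

-- value of A's currSubStrStart before loop step i
def startSpec (cs : List Char) (k : Int) (i : Nat) : Int :=
  if 1 ≤ k then max ((i : Int) - k + 1) (dStart cs i) else (dStart cs i)

-- the window of length k ending at index j
def win (cs : List Char) (k : Int) (j : Nat) : List Char :=
  (cs.drop (j + 1 - k.toNat)).take k.toNat

def winCond (cs : List Char) (k : Int) (j : Nat) : Bool :=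
  decide (1 ≤ k ∧ k ≤ (j : Int) + 1 ∧ (win cs k j).Nodup)

-- A's resultSet after i loop steps
def resAux (cs : List Char) (k : Int) (i : Nat) : PySem.Set String :=
  (List.range i).foldl
    (fun s j => if winCond cs k j then PySem.Set.add s (String.ofList (win cs k j)) else s)
    PySem.Set.empty

def foldA (cs : List Char) (k : Int) (i : Nat) :
    PySem.Dict Char Int × PySem.Set String × Int :=
  ((List.range i).map (Nat.cast : Nat → Int)).foldl (stepA cs k) (PySem.Dict.empty, PySem.Set.empty, 0)

lemma lastBelow_some (cs : List Char) (i : Nat) (c : Char) (m : Nat)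
    (h : lastBelow cs i c = some m) : m < i ∧ cs[m]? = some c := by
  induction i with
  | zero => simp [lastBelow] at h
  | succ i ih =>
    unfold lastBelow at h
    split at h
    · rename_i hc
      have h' : i = m := by injection h
      subst h'
      exact ⟨Nat.lt_succ_self _, hc⟩
    · rcases ih h with ⟨h1, h2⟩; exact ⟨Nat.lt_succ_of_lt h1, h2⟩

lemma lastBelow_ge (cs : List Char) (i : Nat) (c : Char) (p : Nat)
    (hp : p < i) (hc : cs[p]? = some c) : ∃ m, lastBelow cs i c = some m ∧ p ≤ m := by
  induction i with
  | zero => omega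
  | succ i ih =>
    by_cases hc' : cs[i]? = some c
    · exact ⟨i, by simp [lastBelow, hc'], by omega⟩
    · rcases Nat.lt_succ_iff_lt_or_eq.1 hp with h | h
      · rcases ih h with ⟨m, hm, hpm⟩
        exact ⟨m, by simp [lastBelow, hc', hm], hpm⟩
      · subst h; exact absurd hc hc'

lemma occBound_le (cs : List Char) (i : Nat) (c : Char) : occBound cs i c ≤ i := by
  cases h : lastBelow cs i c with
  | none => simp [occBound, h]
  | some m =>
    have := (lastBelow_some cs i c m h).1
    simp only [occBound, h]; omega

lemma dStart_le (cs : List Char) (i : Nat) : dStart cs i ≤ i := by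
  induction i with
  | zero => simp [dStart]
  | succ i ih =>
    unfold dStart
    have := occBound_le cs i (cs.getD i ' ')
    omega

-- membership in a segment
lemma mem_seg (cs : List Char) (i j : Nat) (c : Char) (hj : j ≤ i) (hi : i ≤ cs.length) :
    c ∈ (cs.drop j).take (i - j) ↔ ∃ p, j ≤ p ∧ p < i ∧ cs[p]? = some c := by
  constructor
  · intro hmem
    obtain ⟨t, ht, hEq⟩ := List.mem_iff_getElem.1 hmem
    have hlen : ((cs.drop j).take (i - j)).length = i - j := by
      simp; omega
    refine ⟨j + t, by omega, by omega, ?_⟩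
    rw [List.getElem?_eq_getElem (by omega)]
    rw [List.getElem_take, List.getElem_drop] at hEq
    rw [hEq]
  · rintro ⟨p, hjp, hpi, hc⟩
    have hp : p < cs.length := by
      by_contra hx
      rw [List.getElem?_eq_none_iff.2 (by omega)] at hc
      simp at hc
    have hc' : cs[p] = c := by
      rw [List.getElem?_eq_getElem hp] at hc
      exact Option.some.inj hc
    have hlt : p - j < ((cs.drop j).take (i - j)).length := by simp; omega
    have : ((cs.drop j).take (i - j))[p - j] = c := by
      rw [List.getElem_take, List.getElem_drop]
      simp only [show j + (p - j) = p from by omega]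
      exact hc'
    exact List.mem_iff_getElem.2 ⟨p - j, hlt, this⟩

-- occBound ≤ j says: no occurrence of c in [j, i)
lemma occBound_le_iff (cs : List Char) (i j : Nat) (c : Char) :
    occBound cs i c ≤ j ↔ ∀ p, j ≤ p → p < i → cs[p]? ≠ some c := by
  constructor
  · intro h p hjp hpi hc
    obtain ⟨m, hm, hpm⟩ := lastBelow_ge cs i c p hpi hc
    simp only [occBound, hm] at h
    omega
  · intro h
    cases hlb : lastBelow cs i c with
    | none => simp [occBound, hlb]
    | some m =>
      obtain ⟨hmi, hmc⟩ := lastBelow_some cs i c m hlb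
      simp only [occBound, hlb]
      by_contra hx
      exact h m (by omega) hmi hmc

-- the key window characterisation: dStart i ≤ j iff cs[j..i-1] is duplicate-free
lemma dStart_le_iff (cs : List Char) (i j : Nat) (hi : i ≤ cs.length) (hj : j ≤ i) :
    dStart cs i ≤ j ↔ ((cs.drop j).take (i - j)).Nodup := by
  induction i generalizing j with
  | zero =>
    have : j = 0 := by omega
    subst this
    simp [dStart]
  | succ i ih =>
    rcases Nat.lt_succ_iff_lt_or_eq.1 (Nat.lt_succ_of_le hj) with hji | hji
    · -- j ≤ i
      have hji' : j ≤ i := by omega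
      have hil : i < cs.length := by omega
      have hcd : cs[i]? = some (cs.getD i ' ') := by
        rw [List.getElem?_eq_getElem hil, List.getD_eq_getElem?_getD,
          List.getElem?_eq_getElem hil]
        rfl
      -- the segment up to i+1 is the segment up to i with cs[i] appended
      have hseg : (cs.drop j).take (i + 1 - j) = (cs.drop j).take (i - j) ++ [cs[i]] := by
        rw [show i + 1 - j = (i - j) + 1 by omega, List.take_add_one]
        have : (cs.drop j)[i - j]? = some cs[i] := by
          rw [List.getElem?_drop, show j + (i - j) = i by omega,
            List.getElem?_eq_getElem hil]
        rw [this]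
        rfl
      have hsplit : dStart cs (i + 1) ≤ j ↔
          dStart cs i ≤ j ∧ occBound cs i (cs.getD i ' ') ≤ j := by
        rw [show dStart cs (i + 1) = max (dStart cs i) (occBound cs i (cs.getD i ' ')) from rfl]
        omega
      rw [hsplit, hseg, List.nodup_append, ih j (by omega) hji']
      have hnm : occBound cs i (cs.getD i ' ') ≤ j ↔ cs[i] ∉ (cs.drop j).take (i - j) := by
        rw [occBound_le_iff, mem_seg cs i j cs[i] hji' (by omega)]
        constructor
        · intro h ⟨p, h1, h2, h3⟩
          have := h p h1 h2
          have hgd : cs.getD i ' ' = cs[i] := by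
            rw [List.getD_eq_getElem?_getD, List.getElem?_eq_getElem hil]; rfl
          rw [hgd] at this
          exact this h3
        · intro h p h1 h2 h3
          have hgd : cs.getD i ' ' = cs[i] := by
            rw [List.getD_eq_getElem?_getD, List.getElem?_eq_getElem hil]; rfl
          rw [hgd] at h3
          exact h ⟨p, h1, h2, h3⟩
      rw [hnm]
      constructor
      · rintro ⟨h1, h2⟩
        refine ⟨h1, List.nodup_singleton _, fun a ha b hb => ?_⟩
        simp only [List.mem_singleton] at hb
        subst hb
        exact fun hEq => h2 (hEq ▸ ha)
      · rintro ⟨h1, -, h2⟩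
        exact ⟨h1, fun hmem => h2 cs[i] hmem cs[i] (List.mem_singleton_self _) rfl⟩
    · -- j = i + 1
      subst hji
      simp only [Nat.sub_self, List.take_zero, List.nodup_nil, iff_true]
      have h1 := dStart_le cs (i + 1)
      omega

lemma ofList_length_eq_iff (l : List Char) :
    (PySem.Set.ofList l).length = l.length ↔ l.Nodup := by
  have hfs : (PySem.Set.ofList l).toFinset = l.toFinset := by
    ext c; simp [PySem.Set.mem_ofList]
  constructor
  · intro h
    have h1 : l.dedup.length = l.length := by
      rw [← List.card_toFinset, ← hfs, List.toFinset_card_of_nodup (PySem.Set.nodup_ofList l), h]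
    have := (List.dedup_sublist l).eq_of_length h1
    rw [← this]; exact l.nodup_dedup
  · intro h
    rw [← List.toFinset_card_of_nodup (PySem.Set.nodup_ofList l), hfs,
      List.toFinset_card_of_nodup h]

lemma foldA_succ (cs : List Char) (k : Int) (i : Nat) :
    foldA cs k (i + 1) = stepA cs k (foldA cs k i) (i : Int) := by
  unfold foldA
  rw [List.range_succ]
  simp

lemma resAux_succ (cs : List Char) (k : Int) (i : Nat) :
    resAux cs k (i + 1) =
      if winCond cs k i then PySem.Set.add (resAux cs k i) (String.ofList (win cs k i))
      else resAux cs k i := by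
  unfold resAux
  rw [List.range_succ, List.foldl_append]
  simp

lemma startSpec_nonneg (cs : List Char) (k : Int) (i : Nat) : 0 ≤ startSpec cs k i := by
  unfold startSpec
  split <;> omega

-- ↑(dStart (i+1)) as an Int max
lemma dStart_succ_int (cs : List Char) (i : Nat) :
    (dStart cs (i + 1) : Int) = max (dStart cs i : Int) (occBound cs i (cs.getD i ' ') : Int) := by
  rw [show dStart cs (i + 1) = max (dStart cs i) (occBound cs i (cs.getD i ' ')) from rfl]
  push_cast
  rfl

lemma foldl_skip {α β : Type} (f : β → α → β) (l : List α) (init : β)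
    (h : ∀ s x, x ∈ l → f s x = s) : l.foldl f init = init := by
  induction l generalizing init with
  | nil => rfl
  | cons x xs ih =>
    rw [List.foldl_cons, h init x (by simp)]
    exact ih init (fun s y hy => h s y (by simp [hy]))

lemma resAux_all_false (cs : List Char) (k : Int) (i : Nat)
    (h : ∀ j, j < i → winCond cs k j = false) : resAux cs k i = PySem.Set.empty := by
  unfold resAux
  apply foldl_skip
  intro s j hj
  rw [h j (List.mem_range.1 hj), if_neg Bool.false_ne_true]

-- the main loop invariant for A
lemma foldA_inv (cs : List Char) (k : Int) (hk : k ≠ 0) (i : Nat) (hi : i ≤ cs.length) :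
    (∀ c, (foldA cs k i).1.get? c = (lastBelow cs i c).map (Nat.cast : Nat → Int))
    ∧ (foldA cs k i).2.2 = startSpec cs k i
    ∧ (foldA cs k i).2.1 = resAux cs k i := by
  induction i with
  | zero =>
    refine ⟨fun c => by simp [foldA, lastBelow, PySem.Dict.get?_empty], ?_, rfl⟩
    show (0 : Int) = startSpec cs k 0
    unfold startSpec
    rw [show dStart cs 0 = 0 from rfl]
    split
    · push_cast
      omega
    · simp
  | succ i ih =>
    obtain ⟨hmap, hstart, hres⟩ := ih (by omega)
    have hil : i < cs.length := by omega
    have hcd : cs[i]? = some (cs.getD i ' ') := by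
      rw [List.getD_eq_getElem?_getD, List.getElem?_eq_getElem hil]
      rfl
    -- the new start before the window test is max(old start, 1 + last occurrence)
    have hstart1 : (if (foldA cs k i).1.contains (cs.getD i ' ') ∧
          (foldA cs k i).1.getD (cs.getD i ' ') 0 ≥ startSpec cs k i
        then (foldA cs k i).1.getD (cs.getD i ' ') 0 + 1 else startSpec cs k i)
        = max (startSpec cs k i) (occBound cs i (cs.getD i ' ') : Int) := by
      cases hlb : lastBelow cs i (cs.getD i ' ') with
      | none =>
        have hcont : (foldA cs k i).1.contains (cs.getD i ' ') = false := by
          rw [PySem.Dict.contains_eq_isSome_get?, hmap _, hlb]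
          rfl
        rw [if_neg (by rintro ⟨h1, -⟩; rw [hcont] at h1; exact Bool.false_ne_true h1)]
        rw [show occBound cs i (cs.getD i ' ') = 0 from by unfold occBound; rw [hlb]]
        have := startSpec_nonneg cs k i
        push_cast
        omega
      | some m =>
        have hcont : (foldA cs k i).1.contains (cs.getD i ' ') = true := by
          rw [PySem.Dict.contains_eq_isSome_get?, hmap _, hlb]
          rfl
        have hgd : (foldA cs k i).1.getD (cs.getD i ' ') 0 = (m : Int) := by
          rw [PySem.Dict.getD_eq_get?_getD, hmap _, hlb]
          rfl
        rw [show occBound cs i (cs.getD i ' ') = m + 1 from by unfold occBound; rw [hlb]]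
        by_cases hge : (m : Int) ≥ startSpec cs k i
        · rw [if_pos ⟨hcont, by rw [hgd]; exact hge⟩, hgd]
          push_cast
          omega
        · rw [if_neg (by rintro ⟨-, h⟩; rw [hgd] at h; exact hge h)]
          push_cast
          omega
    have hD1 := dStart_succ_int cs i
    have hdle := dStart_le cs (i + 1)
    have hOle := occBound_le cs i (cs.getD i ' ')
    have hdle0 := dStart_le cs i
    -- the step in closed form
    have hstep : stepA cs k (foldA cs k i) (i : Int) =
        ((foldA cs k i).1.insert (cs.getD i ' ') (i : Int),
          resAux cs k (i + 1), startSpec cs k (i + 1)) := by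
      simp only [stepA, PySem.List.pyGetD_natCast, hstart, hstart1]
      by_cases hk1 : 1 ≤ k
      · have hS : startSpec cs k i = max ((i : Int) - k + 1) (dStart cs i : Int) := by
          unfold startSpec
          rw [if_pos hk1]
        by_cases hfire : (dStart cs (i + 1) : Int) ≤ (i : Int) - k + 1
        · -- the window of length k ending at i is distinct: A records it
          have hki : k ≤ (i : Int) + 1 := by omega
          have hmax : max (startSpec cs k i) (occBound cs i (cs.getD i ' ') : Int)
              = (i : Int) - k + 1 := by rw [hS]; omega
          rw [hmax, if_pos (by omega)]
          have hsl : PySem.List.slice cs (some ((i : Int) - k + 1)) (some ((i : Int) + 1))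
              = win cs k i := by
            rw [show ((i : Int) - k + 1) = ((i + 1 - k.toNat : Nat) : Int) from by omega,
              show ((i : Int) + 1) = ((i + 1 : Nat) : Int) from by omega,
              PySem.List.slice_natCast]
            unfold win
            congr 1
            omega
          have hwc : winCond cs k i = true := by
            have hnd : (win cs k i).Nodup := by
              have h := (dStart_le_iff cs (i + 1) (i + 1 - k.toNat) hi (by omega)).1 (by omega)
              rw [show i + 1 - (i + 1 - k.toNat) = k.toNat from by omega] at h
              exact h
            simp only [winCond, decide_eq_true_eq]
            exact ⟨hk1, hki, hnd⟩
          rw [resAux_succ, hwc, if_pos rfl, hsl, hres]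
          refine congrArg _ (congrArg _ ?_)
          unfold startSpec
          rw [if_pos hk1]
          push_cast
          omega
        · -- duplicate inside the window: A does not record at i
          have hmax : max (startSpec cs k i) (occBound cs i (cs.getD i ' ') : Int)
              = (dStart cs (i + 1) : Int) := by rw [hS]; omega
          rw [hmax, if_neg (by omega)]
          have hwc : winCond cs k i = false := by
            simp only [winCond, decide_eq_false_iff_not]
            rintro ⟨-, hki, hnd⟩
            have h := (dStart_le_iff cs (i + 1) (i + 1 - k.toNat) hi (by omega)).2 (by
              rw [show i + 1 - (i + 1 - k.toNat) = k.toNat from by omega]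
              exact hnd)
            omega
          rw [resAux_succ, hwc, if_neg Bool.false_ne_true, hres]
          refine congrArg _ (congrArg _ ?_)
          unfold startSpec
          rw [if_pos hk1]
          omega
      · -- k < 0: the length test can never fire
        have hkneg : k < 0 := by omega
        have hS : startSpec cs k i = (dStart cs i : Int) := by
          unfold startSpec
          rw [if_neg hk1]
        have hmax : max (startSpec cs k i) (occBound cs i (cs.getD i ' ') : Int)
            = (dStart cs (i + 1) : Int) := by rw [hS]; omega
        rw [hmax, if_neg (by omega)]
        have hwc : winCond cs k i = false := by
          simp only [winCond, decide_eq_false_iff_not]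
          rintro ⟨h1, -, -⟩
          omega
        rw [resAux_succ, hwc, if_neg Bool.false_ne_true, hres]
        refine congrArg _ (congrArg _ ?_)
        unfold startSpec
        rw [if_neg hk1]
    rw [foldA_succ, hstep]
    refine ⟨fun c => ?_, rfl, rfl⟩
    by_cases hccd : c = cs.getD i ' '
    · subst hccd
      rw [PySem.Dict.get?_insert, if_pos rfl]
      rw [show lastBelow cs (i + 1) (cs.getD i ' ')
          = if cs[i]? = some (cs.getD i ' ') then some i else lastBelow cs i (cs.getD i ' ')
          from rfl, if_pos hcd]
      rfl
    · rw [PySem.Dict.get?_insert, if_neg hccd, hmap c]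
      have hne : cs[i]? ≠ some c := by
        rw [hcd]
        intro h
        exact hccd (Option.some.inj h).symm
      rw [show lastBelow cs (i + 1) c
          = if cs[i]? = some c then some i else lastBelow cs i c from rfl, if_neg hne]

-- B's fold equals resAux at n
lemma foldB_eq (cs : List Char) (k : Int) (hk1 : 1 ≤ k) :
    (PySem.List.pyRange 0 ((cs.length : Int) - k + 1)).foldl (stepB cs k) PySem.Set.empty
      = resAux cs k cs.length := by
  · have hkn : ((k.toNat : Int)) = k := Int.toNat_of_nonneg (by omega)
    by_cases hlen : k.toNat ≤ cs.length
    · -- main case: 1 ≤ k ≤ n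
      have hres : resAux cs k cs.length =
          (List.range (cs.length - k.toNat + 1)).foldl
            (fun s t => if winCond cs k (k.toNat - 1 + t) then
              PySem.Set.add s (String.ofList (win cs k (k.toNat - 1 + t))) else s)
            PySem.Set.empty := by
        have hpre : ∀ (s : PySem.Set String) (j : Nat), j ∈ List.range (k.toNat - 1) →
            (if winCond cs k j then PySem.Set.add s (String.ofList (win cs k j)) else s) = s := by
          intro s j hj
          have hj' : j < k.toNat - 1 := List.mem_range.1 hj
          rw [if_neg]
          simp only [winCond, decide_eq_true_eq]
          rintro ⟨-, hkj, -⟩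
          omega
        unfold resAux
        conv_lhs => rw [show cs.length = (k.toNat - 1) + (cs.length - k.toNat + 1) from by omega]
        rw [List.range_add, List.foldl_append, List.foldl_map,
          foldl_skip _ (List.range (k.toNat - 1)) _ hpre]
      rw [hres, PySem.List.pyRange_zero,
        show ((cs.length : Int) - k + 1).toNat = cs.length - k.toNat + 1 from by omega,
        List.foldl_map]
      apply PySem.List.foldl_congr_mem
      intro s t ht
      have ht' : t < cs.length - k.toNat + 1 := List.mem_range.1 ht
      have hsub : PySem.List.slice cs (some (t : Int)) (some ((t : Int) + k))
          = (cs.drop t).take k.toNat := by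
        rw [show ((t : Int) + k) = ((t + k.toNat : Nat) : Int) from by push_cast; omega,
          PySem.List.slice_natCast]
        congr 1
        omega
      have hwin : win cs k (k.toNat - 1 + t) = (cs.drop t).take k.toNat := by
        unfold win
        congr 2
        omega
      have hlensub : ((cs.drop t).take k.toNat).length = k.toNat := by
        simp
        omega
      unfold stepB
      rw [hsub, hwin]
      by_cases hnd : ((cs.drop t).take k.toNat).Nodup
      · rw [if_pos, if_pos]
        · simp only [winCond, decide_eq_true_eq]
          refine ⟨hk1, by push_cast; omega, by rw [hwin]; exact hnd⟩
        · show PySem.Set.len _ = k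
          unfold PySem.Set.len
          rw [ofList_length_eq_iff _ |>.2 hnd, hlensub, hkn]
      · rw [if_neg, if_neg]
        · simp only [winCond, decide_eq_true_eq]
          rintro ⟨-, -, h⟩
          rw [hwin] at h
          exact hnd h
        · show ¬ PySem.Set.len _ = k
          unfold PySem.Set.len
          intro hEq
          apply hnd
          rw [← hlensub]
          apply (ofList_length_eq_iff _).1
          rw [hlensub]
          omega
    · -- 1 ≤ k but k > n: no window of length k exists
      rw [PySem.List.pyRange_zero,
        show ((cs.length : Int) - k + 1).toNat = 0 from by omega]
      rw [show (List.range 0).map (fun kk => ((kk : Nat) : Int)) = ([] : List Int) from rfl]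
      rw [resAux_all_false cs k cs.length (fun j hj => ?_)]
      · rfl
      simp only [winCond, decide_eq_false_iff_not]
      rintro ⟨-, hkj, -⟩
      omega

-- ===== VERDICT (by name: the statement is the Claim_ definition above) =====
theorem subStringK_spec : Claim_equal_subStringK := by
  intro inpStr k _
  unfold Spec_subStringK subStringK subStringK_alt
  by_cases hguard : inpStr = "" ∨ k = 0
  · rw [if_pos hguard,
      if_pos (by rcases hguard with h | h; exacts [Or.inl h, Or.inr (le_of_eq h)])]
  · rw [if_neg hguard, not_or] at *
    obtain ⟨hs, hk⟩ := hguard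
    have hA := (foldA_inv inpStr.toList k hk inpStr.toList.length le_rfl).2.2
    by_cases hk1 : 1 ≤ k
    · rw [if_neg (by rintro (h | h); exacts [hs h, absurd h (by omega)])]
      rw [PySem.Str.len_eq, foldB_eq inpStr.toList k hk1, ← hA]
      unfold foldA
      rw [PySem.List.pyRange_zero, Int.toNat_natCast]
    · rw [if_pos (Or.inr (by omega)), PySem.Str.len_eq]
      have hempty : resAux inpStr.toList k inpStr.toList.length = PySem.Set.empty :=
        resAux_all_false _ _ _ (fun j hj => by
          simp only [winCond, decide_eq_false_iff_not]
          rintro ⟨h1, -, -⟩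
          exact hk1 h1)
      have : (foldA inpStr.toList k inpStr.toList.length).2.1 = [] := by
        rw [hA, hempty]
        rfl
      rw [← this]
      unfold foldA
      rw [PySem.List.pyRange_zero, Int.toNat_natCast]
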